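-- pv_equiv track=rewrite | github.com/Aritrya07/3rd-Sem | python lab/offline lab/08.12.21/p10.py | check_duck
-- ===== SOURCE A (Python) =====
-- def isDigit(a):
--     if a>='0' and a<='9':
--         return True
--     else:
--         return False
--
-- def check_duck(num):
--     n = len(num)
--     if isDigit(num[0]):
--         for i in range(1, n):
--             if isDigit(num[i]):
--                 if num[i]=='0':
--                     return True
--             else:
--                 return False
--         return False
--     else:
--         return False
-- ===== SOURCE B (Python) =====
-- def isDigit(a):
--     if a >= '0' and a <= '9':
--         return True
--     else:
--         return False
--
-- def check_duck(num):
--     # boundary-then-membership: find end of maximal leading digit run, then search slice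
--     if not isDigit(num[0]):
--         return False
--     k = 1
--     while k < len(num) and isDigit(num[k]):
--         k += 1
--     return '0' in num[1:k]
-- ===== Notes on version B (the rewrite author's own statement) =====
-- stated objective: idiomatic
-- what changed: Replaces the index-by-index scan with early True/False returns by computing the end of the maximal leading digit run and then doing a single membership test for the zero digit on that slice.
-- outside the precondition, e.g. on check_duck(''): A raises IndexError, B raises IndexError
import Mathlib
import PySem

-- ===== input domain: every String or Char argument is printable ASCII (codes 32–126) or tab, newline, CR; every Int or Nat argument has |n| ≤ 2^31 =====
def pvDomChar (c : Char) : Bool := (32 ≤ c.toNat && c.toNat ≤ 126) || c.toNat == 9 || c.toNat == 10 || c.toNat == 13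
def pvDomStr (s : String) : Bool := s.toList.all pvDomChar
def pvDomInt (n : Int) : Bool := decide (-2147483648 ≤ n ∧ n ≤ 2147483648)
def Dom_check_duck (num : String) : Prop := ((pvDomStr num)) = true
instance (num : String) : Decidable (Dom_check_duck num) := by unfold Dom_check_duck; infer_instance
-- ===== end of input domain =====

-- B computes the maximal leading digit run's boundary and does one membership test for '0',
-- instead of A's index-by-index scan with early returns (objective: idiomatic; same cost).


-- ===== PORT A =====
def pvIsDigit (a : Char) : Bool := if '0' ≤ a ∧ a ≤ '9' then true else false

-- A's `for i in range(1, n)` scan with early returns, on the tail of the char list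
def pvLoopA : List Char → Bool
  | [] => false
  | x :: xs => if pvIsDigit x then (if x = '0' then true else pvLoopA xs) else false

def check_duck (num : String) : Bool :=
  match num.toList with
  | [] => false          -- unreachable under Pre_: Python raises IndexError on num[0]
  | c :: cs => if pvIsDigit c then pvLoopA cs else false

-- ===== PORT B =====
def check_duck_alt (num : String) : Bool :=
  match num.toList with
  | [] => false          -- unreachable under Pre_: Python raises IndexError on num[0]
  | c :: cs =>
    if pvIsDigit c then
      -- while loop = maximal digit prefix of the tail; then '0' membership on the slice
      (cs.takeWhile pvIsDigit).contains '0'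
    else false

-- ===== PRECONDITION & SPEC =====
-- Pre_ excludes only the empty string, on which A raises IndexError at num[0].
def Pre_check_duck (num : String) : Prop := num ≠ ""
instance (num : String) : Decidable (Pre_check_duck num) := by unfold Pre_check_duck; infer_instance
def pvWitness_check_duck : String := "10"

def Spec_check_duck (num : String) (out : Bool) : Prop := out = check_duck_alt num
instance (num : String) (out : Bool) : Decidable (Spec_check_duck num out) := by unfold Spec_check_duck; infer_instance

-- ===== CLAIM (what is proved, stated in full; the proofs are below) =====
def Claim_equal_check_duck : Prop := ∀ (num : String), Dom_check_duck num → Pre_check_duck num → Spec_check_duck num (check_duck num)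

-- ===== LEMMAS AND PROOFS =====
theorem pvLoopA_eq (xs : List Char) : pvLoopA xs = (xs.takeWhile pvIsDigit).contains '0' := by
  induction xs with
  | nil => simp [pvLoopA]
  | cons x xs ih =>
    by_cases h : pvIsDigit x = true
    · by_cases h0 : x = '0'
      · subst h0; simp [pvLoopA, List.takeWhile, h]
      · simp only [pvLoopA, List.takeWhile, h, if_neg h0, ih, List.contains_cons]
        simp [Ne.symm h0]
    · simp [pvLoopA, List.takeWhile, h]

-- ===== VERDICT (by name: the statement is the Claim_ definition above) =====
theorem check_duck_spec : Claim_equal_check_duck := by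
  intro num _ _
  unfold Spec_check_duck check_duck check_duck_alt
  cases num.toList with
  | nil => rfl
  | cons c cs => by_cases h : pvIsDigit c = true <;> simp [h, pvLoopA_eq]
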